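-- pv_equiv track=rewrite | github.com/djaychela/playground | codefights/daily/dashes.py | dashes
-- ===== SOURCE A (Python) =====
-- def dashes(n):
--     def sc(i):
--         s = '|'
--         l = "-" * i
--         op.append(s.join(l).center(w, ' '))
--
--     op = []
--     w = n * 2 - 1
--     for i in range(1, n + 1):
--         sc(i)
--     for i in range(n - 1, 0, -1):
--         sc(i)
--     return op
-- ===== SOURCE B (Python) =====
-- def dashes(n):
--     top = []
--     body = ''
--     for i in range(1, n + 1):
--         body = body + '|-' if body else '-'
--         pad = ' ' * (n - i)
--         top.append(pad + body + pad)
--     return top + top[:-1][::-1]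
-- ===== Notes on version B (the rewrite author's own statement) =====
-- stated objective: alternative
-- what changed: Instead of calling a centering helper twice over two directional loops, B builds only the top half in one loop, growing the row body incrementally ('' -> '-' -> '-|-' ...) and padding it by string arithmetic instead of str.center, then mirrors the top half with top[:-1][::-1] to get the bottom half.
import Mathlib
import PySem

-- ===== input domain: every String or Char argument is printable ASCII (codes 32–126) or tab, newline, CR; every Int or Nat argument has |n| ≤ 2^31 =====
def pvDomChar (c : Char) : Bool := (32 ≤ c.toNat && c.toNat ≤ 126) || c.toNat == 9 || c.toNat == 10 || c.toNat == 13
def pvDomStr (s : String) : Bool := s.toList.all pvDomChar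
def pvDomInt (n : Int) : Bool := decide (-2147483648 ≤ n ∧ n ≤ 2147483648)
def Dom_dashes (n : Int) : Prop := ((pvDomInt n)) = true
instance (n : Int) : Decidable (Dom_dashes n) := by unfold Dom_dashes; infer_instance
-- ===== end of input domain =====

-- B builds only the top half, growing the row body incrementally and padding by string
-- arithmetic instead of str.center, then mirrors it (top[:-1][::-1]) for the bottom half
-- (alternative decomposition; same rows, same order).

-- ===== PORT A =====
-- Python str.center(width, ' ') on code points, transcribed from CPython's unicode_center:
-- if width <= len(s) return s, else marg = width - len(s), left = marg//2 + (marg & width & 1).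
-- Exact here: the else branch is only reached with width > len(s) ≥ 0, so .toNat is lossless.
def pyCenter (s : List Char) (w : Int) : List Char :=
  if w ≤ (s.length : Int) then s
  else
    let marg := (w - s.length).toNat
    let left := marg / 2 + (marg &&& w.toNat &&& 1)
    List.replicate left ' ' ++ s ++ List.replicate (marg - left) ' '

-- '|'.join('-' * i).center(w, ' ')  (the body of A's closure sc)
def dashRow (i w : Int) : String :=
  String.ofList (pyCenter (PySem.Chars.join ['|'] ((PySem.List.pyRepeat ['-'] i).map (fun c => [c]))) w)

def dashes (n : Int) : List String :=
  let w := n * 2 - 1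
  let op := (PySem.List.pyRange 1 (n + 1) 1).foldl (fun op i => op ++ [dashRow i w]) []
  (PySem.List.pyRange (n - 1) 0 (-1)).foldl (fun op i => op ++ [dashRow i w]) op

-- ===== PORT B =====
-- state of B's loop: (body, top); then 'return top + top[:-1][::-1]'
def dashes_alt (n : Int) : List String :=
  let st := (PySem.List.pyRange 1 (n + 1) 1).foldl
    (fun (st : List Char × List String) i =>
      let body := if st.1 ≠ [] then st.1 ++ ['|', '-'] else ['-']
      let pad := List.replicate (n - i).toNat ' '
      (body, st.2 ++ [String.ofList (pad ++ body ++ pad)])) ([], [])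
  let top := st.2
  top ++ (PySem.List.slice? (PySem.List.slice top none (some (-1))) none none (-1)).getD []

-- ===== PRECONDITION & SPEC =====
def Spec_dashes (n : Int) (out : List String) : Prop := out = dashes_alt n
instance (n : Int) (out : List String) : Decidable (Spec_dashes n out) := by unfold Spec_dashes; infer_instance

-- ===== CLAIM (what is proved, stated in full; the proofs are below) =====
def Claim_equal_dashes : Prop := ∀ (n : Int), Dom_dashes n → Spec_dashes n (dashes n)

-- ===== LEMMAS AND PROOFS =====

-- the row body B grows: [] → "-" → "-|-" → …
def bodyF : Nat → List Char
  | 0 => []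
  | m + 1 => if bodyF m ≠ [] then bodyF m ++ ['|', '-'] else ['-']

theorem bodyF_ne_nil (m : Nat) : bodyF (m + 1) ≠ [] := by
  unfold bodyF; split <;> simp

theorem bodyF_length (m : Nat) : (bodyF (m + 1)).length = 2 * m + 1 := by
  induction m with
  | zero => decide
  | succ k ih =>
    show (if bodyF (k + 1) ≠ [] then bodyF (k + 1) ++ ['|', '-'] else ['-']).length = _
    rw [if_pos (bodyF_ne_nil k)]
    simp only [List.length_append, List.length_cons, List.length_nil, ih]
    omega

theorem bodyF_eq_join (m : Nat) :
    bodyF m = PySem.Chars.join ['|'] ((List.replicate m '-').map (fun c => [c])) := by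
  induction m with
  | zero => decide
  | succ k ih =>
    cases k with
    | zero => decide
    | succ j =>
      show (if bodyF (j + 1) ≠ [] then bodyF (j + 1) ++ ['|', '-'] else ['-']) = _
      rw [if_pos (bodyF_ne_nil j), ih]
      clear ih
      induction j with
      | zero => decide
      | succ p ihp =>
        simp only [List.replicate_succ, List.map_cons, List.map_replicate,
          PySem.Chars.join_cons_cons, List.cons_append, List.nil_append] at *
        rw [← ihp]

-- str.center with an even margin 2*h splits the padding exactly h / h
theorem pyCenter_even_margin (s : List Char) (h : Nat) :
    pyCenter s ((s.length : Int) + 2 * h) = List.replicate h ' ' ++ s ++ List.replicate h ' ' := by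
  unfold pyCenter
  by_cases h0 : h = 0
  · subst h0; simp
  · rw [if_neg (by omega)]
    have hand : ∀ w' : Nat, (2 * h &&& w' &&& 1) = 0 := by
      intro w'
      rw [Nat.and_assoc, Nat.and_one_is_mod]
      rcases Nat.mod_two_eq_zero_or_one w' with h1 | h1 <;> rw [h1]
      · simp
      · rw [Nat.and_one_is_mod]; omega
    have hm : ((s.length : Int) + 2 * h - s.length).toNat = 2 * h := by omega
    simp only [hm, hand]
    have e1 : 2 * h / 2 + 0 = h := by omega
    rw [e1]
    have e2 : 2 * h - h = h := by omega
    rw [e2]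

-- the row A builds equals the row B builds, for 1 ≤ i ≤ n
theorem dashRow_eq (n i : Int) (h1 : 1 ≤ i) (h2 : i ≤ n) :
    dashRow i (n * 2 - 1) =
      String.ofList (List.replicate (n - i).toNat ' ' ++ bodyF i.toNat ++ List.replicate (n - i).toNat ' ') := by
  unfold dashRow
  rw [PySem.List.pyRepeat_singleton, ← bodyF_eq_join]
  obtain ⟨m, hm⟩ : ∃ m, i.toNat = m + 1 := ⟨i.toNat - 1, by omega⟩
  have hw : n * 2 - 1 = (((bodyF i.toNat).length : Int)) + 2 * ((n - i).toNat : Nat) := by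
    rw [hm, bodyF_length]; push_cast; omega
  rw [hw, pyCenter_even_margin]

-- B's loop invariant: after the first m iterations the state is (bodyF m, the m rows built so far)
theorem foldB (n : Int) (m : Nat) :
    (PySem.List.pyRange 1 (1 + (m : Int)) 1).foldl
      (fun (st : List Char × List String) i =>
        let body := if st.1 ≠ [] then st.1 ++ ['|', '-'] else ['-']
        let pad := List.replicate (n - i).toNat ' '
        (body, st.2 ++ [String.ofList (pad ++ body ++ pad)])) ([], [])
    = (bodyF m, (PySem.List.pyRange 1 (1 + (m : Int)) 1).map
        (fun i => String.ofList (List.replicate (n - i).toNat ' ' ++ bodyF i.toNat ++ List.replicate (n - i).toNat ' '))) := by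
  induction m with
  | zero =>
    rw [PySem.List.pyRange_one_eq_nil (by omega)]; rfl
  | succ k ih =>
    have hsplit : PySem.List.pyRange 1 (1 + ((k : Int) + 1)) 1
        = PySem.List.pyRange 1 (1 + (k : Int)) 1 ++ [1 + (k : Int)] := by
      rw [show (1 : Int) + ((k : Int) + 1) = 1 + (k : Int) + 1 by ring]
      exact PySem.List.pyRange_one_succ_right (by omega)
    push_cast
    rw [hsplit, List.foldl_append, ih, List.map_append]
    simp only [List.foldl_cons, List.foldl_nil, List.map_cons, List.map_nil]
    have hb : bodyF (k + 1) = if bodyF k ≠ [] then bodyF k ++ ['|', '-'] else ['-'] := rfl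
    have ht : (1 + (k : Int)).toNat = k + 1 := by omega
    simp only [ht, hb]

-- ===== VERDICT (by name: the statement is the Claim_ definition above) =====
theorem dashes_spec : Claim_equal_dashes := by
  intro n _
  unfold Spec_dashes dashes dashes_alt
  show (PySem.List.pyRange (n - 1) 0 (-1)).foldl (fun op i => op ++ [dashRow i (n * 2 - 1)])
        ((PySem.List.pyRange 1 (n + 1) 1).foldl (fun op i => op ++ [dashRow i (n * 2 - 1)]) [])
      = (let st := (PySem.List.pyRange 1 (n + 1) 1).foldl
           (fun (st : List Char × List String) i =>
             let body := if st.1 ≠ [] then st.1 ++ ['|', '-'] else ['-']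
             let pad := List.replicate (n - i).toNat ' '
             (body, st.2 ++ [String.ofList (pad ++ body ++ pad)])) ([], [])
         st.2 ++ (PySem.List.slice? (PySem.List.slice st.2 none (some (-1))) none none (-1)).getD [])
  by_cases hn : n ≤ 0
  · rw [PySem.List.pyRange_one_eq_nil (show n + 1 ≤ 1 by omega),
        PySem.List.pyRange_neg_one_eq_nil (show n - 1 ≤ 0 by omega)]
    rfl
  · push Not at hn
    have hcast : n + 1 = 1 + (n.toNat : Int) := by omega
    rw [PySem.List.foldl_append_singleton_eq_map, PySem.List.foldl_append_singleton_eq_map,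
        List.nil_append, hcast, foldB]
    simp only
    rw [PySem.List.slice_to_neg_one, PySem.List.slice?_none_none_neg_one, Option.getD_some]
    have hsplit : PySem.List.pyRange 1 (1 + (n.toNat : Int)) 1
        = PySem.List.pyRange 1 n 1 ++ [n] := by
      rw [← hcast]
      exact PySem.List.pyRange_one_succ_right (by omega)
    congr 1
    · refine List.map_congr_left ?_
      intro i hi
      rw [PySem.List.mem_pyRange_one] at hi
      exact dashRow_eq n i hi.1 (by omega)
    · rw [PySem.List.pyRange_neg_one_eq_reverse,
          show (0 : Int) + 1 = 1 by norm_num, show n - 1 + 1 = n by ring,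
          List.map_reverse, hsplit, List.map_append, List.map_singleton,
          List.dropLast_concat]
      congr 1
      refine List.map_congr_left ?_
      intro i hi
      rw [PySem.List.mem_pyRange_one] at hi
      exact dashRow_eq n i hi.1 (by omega)
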